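-- pv_equiv track=rewrite | github.com/safenumero/mbti-classification | mbtiapp/preproc_eda/preprocess.py | label_y_val
-- ===== SOURCE A (Python) =====
-- def label_y_val(y_val_raw):
--
--     y_val_list = ['enfj', 'enfp', 'entj', 'entp', 'esfj', 'esfp', 'estj', 'estp', 'infj', 'infp', 'intj', 'intp', 'isfj', 'isfp', 'istj', 'istp']
--     target = total_target = ''
--     result_dict = {}
--
--     try:
--         for word in y_val_list:
--             idx = y_val_raw.lower().find(word)
--             if idx >= 0:
--                 result_dict[word] = idx
--
--         res = sorted(result_dict.items(), key=(lambda x: x[1]))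
--
--         total_list = []
--
--         for cnt, word in enumerate(res):
--             if cnt == 0:
--                 target = word[0]
--             total_list.append(word[0])
--
--         total_target = ','.join(total_list)
--     except:
--         pass
--
--     return target, total_target
-- ===== SOURCE B (Python) =====
-- def label_y_val(y_val_raw):
--     # Single left-to-right scan over the lowered text: look at the 4-char
--     # window at every position and record each MBTI type the first time it
--     # appears; that yields the types already ordered by first occurrence.
--     types = ('enfj', 'enfp', 'entj', 'entp', 'esfj', 'esfp', 'estj', 'estp',
--              'infj', 'infp', 'intj', 'intp', 'isfj', 'isfp', 'istj', 'istp')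
--     try:
--         s = y_val_raw.lower()
--         seen = []
--         while s:
--             w = s[:4]
--             if w in types and w not in seen:
--                 seen.append(w)
--             s = s[1:]
--         return (seen[0] if seen else ''), ','.join(seen)
--     except Exception:
--         return '', ''
-- ===== Notes on version B (the rewrite author's own statement) =====
-- stated objective: alternative
-- what changed: Replaces A's sixteen separate .find() passes plus dict-building and an index sort by a single left-to-right scan of the lowered string that checks the 4-char window at each position and records each MBTI type the first time it appears, which yields the types already ordered by first occurrence so no dict and no sort are needed.
import Mathlib
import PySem

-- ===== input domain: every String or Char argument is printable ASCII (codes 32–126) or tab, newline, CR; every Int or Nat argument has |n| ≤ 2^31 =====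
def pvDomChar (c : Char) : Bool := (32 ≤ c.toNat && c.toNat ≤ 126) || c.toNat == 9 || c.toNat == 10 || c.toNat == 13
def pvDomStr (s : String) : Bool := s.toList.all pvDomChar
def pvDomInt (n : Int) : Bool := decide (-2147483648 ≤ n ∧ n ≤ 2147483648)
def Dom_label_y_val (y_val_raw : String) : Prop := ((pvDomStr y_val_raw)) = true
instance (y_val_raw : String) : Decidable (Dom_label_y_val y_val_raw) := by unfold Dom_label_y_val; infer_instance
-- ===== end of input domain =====

-- B replaces A's sixteen .find passes + dict + sort by ONE left-to-right scan of the
-- lowered text (4-char window, first occurrence per type is automatically in position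
-- order), so no dictionary and no sort are needed (objective: alternative/simpler).

-- ===== PORT A =====
def label_y_val (y_val_raw : String) : String × String :=
  let y_val_list : List String :=
    ["enfj", "enfp", "entj", "entp", "esfj", "esfp", "estj", "estp",
     "infj", "infp", "intj", "intp", "isfj", "isfp", "istj", "istp"]
  let result_dict : PySem.Dict String Int :=
    y_val_list.foldl (fun d word =>
      let idx := PySem.Str.find (PySem.Str.lower y_val_raw) word
      if idx ≥ 0 then d.insert word idx else d) PySem.Dict.empty
  let res := PySem.List.sorted result_dict.items (fun x => x.2)
  -- for cnt, word in enumerate(res): …  (cnt carried in the fold state)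
  let fin := res.foldl (fun (st : Nat × String × List String) word =>
      let target := if st.1 = 0 then word.1 else st.2.1
      (st.1 + 1, target, st.2.2 ++ [word.1]))
    ((0 : Nat), "", ([] : List String))
  (fin.2.1, PySem.Str.join "," fin.2.2)

-- ===== PORT B =====
def pvTypesC : List (List Char) :=
  [['e','n','f','j'], ['e','n','f','p'], ['e','n','t','j'], ['e','n','t','p'],
   ['e','s','f','j'], ['e','s','f','p'], ['e','s','t','j'], ['e','s','t','p'],
   ['i','n','f','j'], ['i','n','f','p'], ['i','n','t','j'], ['i','n','t','p'],
   ['i','s','f','j'], ['i','s','f','p'], ['i','s','t','j'], ['i','s','t','p']]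

-- the while loop of Source B: chop the head of s until it is empty, looking at s[:4]
def pvScan : List Char → List (List Char) → List (List Char)
  | [], seen => seen
  | c :: rest, seen =>
      let w := (c :: rest).take 4
      if w ∈ pvTypesC ∧ w ∉ seen then pvScan rest (seen ++ [w])
      else pvScan rest seen

def label_y_val_alt (y_val_raw : String) : String × String :=
  let s := (PySem.Str.lower y_val_raw).toList
  let seen := pvScan s []
  ((match seen with | [] => "" | w :: _ => String.ofList w),
   String.ofList (PySem.Chars.join [','] seen))

-- ===== PRECONDITION & SPEC =====
def Spec_label_y_val (y_val_raw : String) (out : String × String) : Prop := out = label_y_val_alt y_val_raw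
instance (y_val_raw : String) (out : String × String) : Decidable (Spec_label_y_val y_val_raw out) := by unfold Spec_label_y_val; infer_instance

-- ===== CLAIM (what is proved, stated in full; the proofs are below) =====
def Claim_equal_label_y_val : Prop := ∀ (y_val_raw : String), Dom_label_y_val y_val_raw → Spec_label_y_val y_val_raw (label_y_val y_val_raw)

-- ===== LEMMAS AND PROOFS =====

theorem pvTypesC_len : ∀ w ∈ pvTypesC, w.length = 4 := by decide

-- a type whose first occurrence in s is at position k IS the 4-char window at k
theorem pv_window_eq (s : List Char) (k : Nat) (v : List Char)
    (hv : v ∈ pvTypesC) (h0 : 0 ≤ PySem.Chars.find s v)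
    (hk : (PySem.Chars.find s v).toNat = k) :
    v = (s.drop k).take 4 := by
  have hpre : v <+: s.drop k := hk ▸ (PySem.Chars.find_spec h0).1
  have := List.prefix_iff_eq_take.mp hpre
  rwa [pvTypesC_len v hv] at this

theorem pv_find_nonneg_of_prefix_drop (s : List Char) (k : Nat) (w : List Char)
    (h : w <+: s.drop k) : 0 ≤ PySem.Chars.find s w := by
  rw [PySem.Chars.find_nonneg_iff, ← PySem.Chars.isIn_iff_infix,
    ← PySem.Chars.exists_prefix_drop_iff_isIn]
  exact ⟨k, h⟩

-- invariant of B's scan: pvScan (s.drop k) seen collects, in strictly increasing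
-- first-occurrence order, exactly the MBTI types that occur in s
theorem pvScan_spec (s : List Char) :
    ∀ (u : List Char) (k : Nat) (seen : List (List Char)),
      u = s.drop k →
      (∀ w ∈ seen, w ∈ pvTypesC ∧ 0 ≤ PySem.Chars.find s w ∧ (PySem.Chars.find s w).toNat < k) →
      seen.Pairwise (fun a b => PySem.Chars.find s a < PySem.Chars.find s b) →
      (∀ w ∈ pvTypesC, 0 ≤ PySem.Chars.find s w → (PySem.Chars.find s w).toNat < k → w ∈ seen) →
      (∀ w ∈ pvScan u seen, w ∈ pvTypesC ∧ 0 ≤ PySem.Chars.find s w) ∧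
      (pvScan u seen).Pairwise (fun a b => PySem.Chars.find s a < PySem.Chars.find s b) ∧
      (∀ w ∈ pvTypesC, 0 ≤ PySem.Chars.find s w → w ∈ pvScan u seen) := by
  intro u
  induction u with
  | nil =>
      intro k seen hk hmem hpw hcomp
      refine ⟨fun w hw => ⟨(hmem w hw).1, (hmem w hw).2.1⟩, hpw, ?_⟩
      intro w hwT h0
      refine hcomp w hwT h0 ?_
      have hlen : s.length ≤ k := List.drop_eq_nil_iff.mp hk.symm
      have hle : PySem.Chars.find s w ≤ s.length := PySem.Chars.find_le_length s w
      have hne : (PySem.Chars.find s w).toNat ≠ s.length := by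
        intro heq
        have hpre : w <+: s.drop s.length := heq ▸ (PySem.Chars.find_spec h0).1
        rw [List.drop_length] at hpre
        have := List.prefix_nil.mp hpre
        have := pvTypesC_len w hwT
        simp [‹w = []›] at this
      omega
  | cons c rest ih =>
      intro k seen hk hmem hpw hcomp
      have hrest : rest = s.drop (k + 1) := by
        rw [← List.tail_drop, ← hk]; rfl
      set w : List Char := (c :: rest).take 4 with hw
      have hwpre : w <+: s.drop k := by rw [← hk]; exact List.take_prefix 4 _
      simp only [pvScan]
      by_cases hcase : w ∈ pvTypesC ∧ w ∉ seen
      · rw [if_pos hcase]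
        have h0 : 0 ≤ PySem.Chars.find s w := pv_find_nonneg_of_prefix_drop s k w hwpre
        have hle : (PySem.Chars.find s w).toNat ≤ k := by
          by_contra h
          exact ((PySem.Chars.find_spec h0).2 k (by omega)) hwpre
        have hge : ¬ (PySem.Chars.find s w).toNat < k := fun h =>
          hcase.2 (hcomp w hcase.1 h0 h)
        have hfk : (PySem.Chars.find s w).toNat = k := by omega
        refine ih (k + 1) (seen ++ [w]) hrest ?_ ?_ ?_
        · intro v hv
          rcases List.mem_append.mp hv with h | h
          · obtain ⟨a, b, c'⟩ := hmem v h; exact ⟨a, b, by omega⟩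
          · simp only [List.mem_singleton] at h
            subst h; exact ⟨hcase.1, h0, by omega⟩
        · rw [List.pairwise_append]
          refine ⟨hpw, List.pairwise_singleton _ _, ?_⟩
          intro a ha b hb
          simp only [List.mem_singleton] at hb; subst hb
          obtain ⟨_, ha0, hak⟩ := hmem a ha
          omega
        · intro v hvT hv0 hvk
          rcases Nat.lt_succ_iff_lt_or_eq.mp hvk with h | h
          · exact List.mem_append.mpr (Or.inl (hcomp v hvT hv0 h))
          · have : v = w := by rw [pv_window_eq s k v hvT hv0 h, ← hk]
            simp [this]
      · rw [if_neg hcase]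
        refine ih (k + 1) seen hrest ?_ hpw ?_
        · intro v hv
          obtain ⟨a, b, c'⟩ := hmem v hv; exact ⟨a, b, by omega⟩
        · intro v hvT hv0 hvk
          rcases Nat.lt_succ_iff_lt_or_eq.mp hvk with h | h
          · exact hcomp v hvT hv0 h
          · have hvw : v = w := by rw [pv_window_eq s k v hvT hv0 h, ← hk]
            subst hvw
            rcases not_and_or.mp hcase with h' | h'
            · exact absurd hvT h'
            · exact not_not.mp h'

-- A's dict-building fold, in closed form
theorem pvItems_fold (g : String → Int) :
    ∀ (ws : List String) (d : PySem.Dict String Int),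
      (∀ w ∈ ws, d.contains w = false) → ws.Nodup →
      (ws.foldl (fun d word => if g word ≥ 0 then d.insert word (g word) else d) d).items
        = d.items ++ (ws.filter (fun w => decide (g w ≥ 0))).map (fun w => (w, g w)) := by
  intro ws
  induction ws with
  | nil => intro d _ _; simp
  | cons w t ih =>
      intro d hc hnd
      have hw : d.contains w = false := hc w (by simp)
      have hnd' : t.Nodup := (List.nodup_cons.mp hnd).2
      have hwt : w ∉ t := (List.nodup_cons.mp hnd).1
      by_cases hg : g w ≥ 0
      · simp only [List.foldl_cons, if_pos hg]
        rw [ih _ ?_ hnd']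
        · rw [PySem.Dict.items_insert_of_not_contains d (g w) hw]
          simp [hg]
        · intro v hv
          rw [PySem.Dict.contains_insert]
          have : v ≠ w := fun h => hwt (h ▸ hv)
          simp [this, hc v (by simp [hv])]
      · simp only [List.foldl_cons, if_neg hg]
        rw [ih _ (fun v hv => hc v (by simp [hv])) hnd']
        simp [hg]

-- A's enumerate loop, in closed form
theorem pvFin_fold_aux (l : List (String × Int)) :
    ∀ (n : Nat) (tgt : String) (acc : List String), n ≠ 0 →
    l.foldl (fun (st : Nat × String × List String) word =>
        (st.1 + 1, (if st.1 = 0 then word.1 else st.2.1), st.2.2 ++ [word.1]))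
      (n, tgt, acc)
      = (n + l.length, tgt, acc ++ l.map (·.1)) := by
  induction l with
  | nil => intro n tgt acc _; simp
  | cons x t ih =>
      intro n tgt acc hn
      simp only [List.foldl_cons, if_neg hn, List.map_cons]
      rw [ih _ _ _ (by omega)]
      simp; omega

theorem pvFin_fold (l : List (String × Int)) :
    l.foldl (fun (st : Nat × String × List String) word =>
        (st.1 + 1, (if st.1 = 0 then word.1 else st.2.1), st.2.2 ++ [word.1]))
      ((0 : Nat), "", ([] : List String))
      = (l.length, (match l with | [] => "" | x :: _ => x.1), l.map (·.1)) := by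
  cases l with
  | nil => simp
  | cons x t =>
      simp only [List.foldl_cons]
      norm_num
      rw [pvFin_fold_aux t 1 x.1 [x.1] (by omega)]
      simp [Nat.add_comm]

theorem pv_str_eq_of_toList (s t : String) (h : s.toList = t.toList) : s = t := by
  rw [← String.ofList_toList (s := s), ← String.ofList_toList (s := t), h]

theorem pvC_toStr : ∀ w ∈ pvTypesC, String.ofList w ∈
    ["enfj", "enfp", "entj", "entp", "esfj", "esfp", "estj", "estp",
     "infj", "infp", "intj", "intp", "isfj", "isfp", "istj", "istp"] := by decide

theorem pvStr_toC : ∀ v ∈ ["enfj", "enfp", "entj", "entp", "esfj", "esfp", "estj", "estp",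
     "infj", "infp", "intj", "intp", "isfj", "isfp", "istj", "istp"], v.toList ∈ pvTypesC := by decide

theorem pv_final (y_val_raw : String) : label_y_val y_val_raw = label_y_val_alt y_val_raw := by
  obtain ⟨hR1, hR2, hR3⟩ := pvScan_spec (PySem.Chars.lower y_val_raw.toList)
    (PySem.Chars.lower y_val_raw.toList) 0 [] (by simp) (by simp) (by simp)
    (by intro w _ _ h; omega)
  simp only [label_y_val, label_y_val_alt]
  rw [pvItems_fold (fun word => PySem.Str.find (PySem.Str.lower y_val_raw) word)
    ["enfj", "enfp", "entj", "entp", "esfj", "esfp", "estj", "estp",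
     "infj", "infp", "intj", "intp", "isfj", "isfp", "istj", "istp"]
    PySem.Dict.empty (fun w _ => PySem.Dict.contains_empty w) (by decide)]
  simp only [PySem.Str.find_eq, PySem.Str.toList_lower]
  rw [show (PySem.Dict.empty : PySem.Dict String Int).items = [] from rfl, List.nil_append]
  set sL : List Char := PySem.Chars.lower y_val_raw.toList with hsL
  set R : List (List Char) := pvScan sL [] with hRdef
  have hRnd : R.Nodup := hR2.imp (fun {a b} h e => by subst e; omega)
  have hinj : Function.Injective (fun w : List Char => (String.ofList w, PySem.Chars.find sL w)) := by
    intro a b h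
    have := congrArg (fun p : String × Int => p.1.toList) h
    simpa [String.toList_ofList] using this
  have hysnd : (R.map (fun w => (String.ofList w, PySem.Chars.find sL w))).Nodup := hRnd.map hinj
  have hitnd : ((List.filter (fun w => decide (PySem.Chars.find sL w.toList ≥ 0))
      ["enfj", "enfp", "entj", "entp", "esfj", "esfp", "estj", "estp",
       "infj", "infp", "intj", "intp", "isfj", "isfp", "istj", "istp"]).map
        (fun w => (w, PySem.Chars.find sL w.toList))).Nodup := by
    refine (List.Nodup.filter _ (by decide)).map ?_
    intro a b h; exact congrArg Prod.fst h
  have hmemiff : ∀ x, x ∈ R.map (fun w => (String.ofList w, PySem.Chars.find sL w)) ↔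
      x ∈ (List.filter (fun w => decide (PySem.Chars.find sL w.toList ≥ 0))
      ["enfj", "enfp", "entj", "entp", "esfj", "esfp", "estj", "estp",
       "infj", "infp", "intj", "intp", "isfj", "isfp", "istj", "istp"]).map
        (fun w => (w, PySem.Chars.find sL w.toList)) := by
    intro x
    constructor
    · intro hx
      obtain ⟨w, hwR, rfl⟩ := List.mem_map.mp hx
      obtain ⟨hwT, hw0⟩ := hR1 w hwR
      refine List.mem_map.mpr ⟨String.ofList w, ?_, ?_⟩
      · refine List.mem_filter.mpr ⟨?_, ?_⟩
        · exact pvC_toStr w hwT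
        · simp only [String.toList_ofList]
          exact decide_eq_true hw0
      · simp [String.toList_ofList]
    · intro hx
      obtain ⟨v, hv, rfl⟩ := List.mem_map.mp hx
      obtain ⟨hvT, hv0⟩ := List.mem_filter.mp hv
      have hv0' : 0 ≤ PySem.Chars.find sL v.toList := of_decide_eq_true hv0
      have hvC : v.toList ∈ pvTypesC := pvStr_toC v hvT
      refine List.mem_map.mpr ⟨v.toList, hR3 v.toList hvC hv0', ?_⟩
      simp [String.ofList_toList]
  have hpair : (R.map (fun w => (String.ofList w, PySem.Chars.find sL w))).Pairwise
      (fun a b => a.2 < b.2) := by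
    rw [List.pairwise_map]; exact hR2
  rw [PySem.List.sorted_eq_of_perm_of_pairwise_lt _
    (R.map (fun w => (String.ofList w, PySem.Chars.find sL w))) (fun x => x.2)
    ((List.perm_ext_iff_of_nodup hysnd hitnd).mpr hmemiff) hpair]
  rw [pvFin_fold]
  have hjoin : ∀ (L : List (List Char)),
      PySem.Str.join "," ((L.map (fun w => (String.ofList w, PySem.Chars.find sL w))).map (fun x => x.1))
        = String.ofList (PySem.Chars.join [','] L) := by
    intro L
    apply pv_str_eq_of_toList
    rw [PySem.Str.toList_join, String.toList_ofList, List.map_map, List.map_map]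
    simp [Function.comp_def, String.toList_ofList]
  cases R with
  | nil =>
      refine Prod.ext ?_ ?_
      · rfl
      · simpa using hjoin []
  | cons w t =>
      refine Prod.ext ?_ ?_
      · rfl
      · simpa using hjoin (w :: t)

-- ===== VERDICT (by name: the statement is the Claim_ definition above) =====
theorem label_y_val_spec : Claim_equal_label_y_val := by
  intro y_val_raw _
  unfold Spec_label_y_val
  exact pv_final y_val_raw
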